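-- pv_equiv track=rewrite | github.com/JAMIEL-J/vizzy-ai | backend/app/services/analytics/kpi_engine.py | _pick_best_churn_value_metric
-- ===== SOURCE A (Python) =====
-- from typing import Dict, Any, List, Optional
--
-- def _normalized_col(col: str) -> str:
--     return str(col).lower().replace("_", "").replace("-", "").strip()
--
-- def _pick_best_churn_value_metric(candidates: List[str]) -> Optional[str]:
--     """
--     Select best monetary metric for churn KPIs.
--
--     Preference order:
--     1) Total/annual/lifetime revenue-like columns (e.g. TotalCharges, AnnualRevenue)
--     2) Generic revenue/value columns that are not monthly
--     3) Monthly revenue-like columns as fallback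
--     """
--     if not candidates:
--         return None
--
--     normalized = [(_normalized_col(c), c) for c in candidates]
--
--     total_like = (
--         'total', 'annual', 'yearly', 'arr', 'lifetime', 'ltv',
--         'totalrevenue', 'grossrevenue', 'totalcharge', 'totalcharges'
--     )
--     revenue_like = (
--         'revenue', 'sales', 'income', 'billing', 'amount', 'charge', 'charges', 'value'
--     )
--     monthly_like = ('monthly', 'month', 'mrr')
--
--     for n, c in normalized:
--         if any(t in n for t in total_like) and any(t in n for t in revenue_like):
--             return c
--
--     for n, c in normalized:
--         if any(t in n for t in revenue_like) and not any(t in n for t in monthly_like):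
--             return c
--
--     for n, c in normalized:
--         if any(t in n for t in monthly_like) and any(t in n for t in revenue_like):
--             return c
--
--     return candidates[0]
-- ===== SOURCE B (Python) =====
-- def _normalized_col(col: str) -> str:
--     return str(col).lower().replace("_", "").replace("-", "").strip()
--
-- _TOTAL_LIKE = ('total', 'annual', 'yearly', 'arr', 'lifetime', 'ltv',
--                'totalrevenue', 'grossrevenue', 'totalcharge', 'totalcharges')
-- _REVENUE_LIKE = ('revenue', 'sales', 'income', 'billing', 'amount',
--                  'charge', 'charges', 'value')
-- _MONTHLY_LIKE = ('monthly', 'month', 'mrr')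
--
-- def _rank(c: str) -> int:
--     n = _normalized_col(c)
--     t = any(x in n for x in _TOTAL_LIKE)
--     r = any(x in n for x in _REVENUE_LIKE)
--     m = any(x in n for x in _MONTHLY_LIKE)
--     if t and r:
--         return 1
--     if r and not m:
--         return 2
--     if m and r:
--         return 3
--     return 4
--
-- def _pick_best_churn_value_metric(candidates):
--     if not candidates:
--         return None
--     best_rank, best = 4, None
--     for c in candidates:
--         rank = _rank(c)
--         if rank < best_rank:
--             best_rank, best = rank, c
--     return best if best is not None else candidates[0]
-- ===== Notes on version B (the rewrite author's own statement) =====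
-- stated objective: simpler
-- what changed: Replaced A's three separate find-first scans over the normalized list by a single pass that assigns each candidate a preference rank (1: total&revenue, 2: revenue&not-monthly, 3: monthly&revenue, 4: none) and keeps the first candidate with the lowest rank seen, falling back to candidates[0].
import Mathlib
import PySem

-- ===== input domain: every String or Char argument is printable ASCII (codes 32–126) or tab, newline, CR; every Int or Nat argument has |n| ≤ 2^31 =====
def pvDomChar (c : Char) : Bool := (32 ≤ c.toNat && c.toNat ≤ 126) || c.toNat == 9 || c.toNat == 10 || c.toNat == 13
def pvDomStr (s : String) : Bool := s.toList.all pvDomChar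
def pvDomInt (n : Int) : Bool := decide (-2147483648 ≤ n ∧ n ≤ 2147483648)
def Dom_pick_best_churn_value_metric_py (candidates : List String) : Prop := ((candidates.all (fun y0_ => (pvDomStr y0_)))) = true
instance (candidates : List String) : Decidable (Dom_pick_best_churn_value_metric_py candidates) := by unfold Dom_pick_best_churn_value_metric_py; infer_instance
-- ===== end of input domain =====

-- B replaces A's three separate find-first scans by one pass that tracks the lowest
-- preference rank seen so far and its first achiever (objective: simpler decomposition).

-- shared module helpers (both Pythons use _normalized_col and the same keyword tuples)
def normalizedCol (c : String) : String :=
  PySem.Str.strip (PySem.Str.replace (PySem.Str.replace (PySem.Str.lower c) "_" "") "-" "")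

def totalLike : List String :=
  ["total", "annual", "yearly", "arr", "lifetime", "ltv",
   "totalrevenue", "grossrevenue", "totalcharge", "totalcharges"]
def revenueLike : List String :=
  ["revenue", "sales", "income", "billing", "amount", "charge", "charges", "value"]
def monthlyLike : List String := ["monthly", "month", "mrr"]

-- any(t in n for t in ts)
def anyIn (ts : List String) (n : String) : Bool := ts.any (fun t => PySem.Str.isIn t n)

-- ===== PORT A =====
-- the three 'for n, c in normalized: if …: return c' scans plus the final 'return candidates[0]'
def threeScans (normalized : List (String × String)) (c0 : String) : Option String :=
  match normalized.find? (fun nc => anyIn totalLike nc.1 && anyIn revenueLike nc.1) with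
  | some nc => some nc.2
  | none =>
    match normalized.find? (fun nc => anyIn revenueLike nc.1 && !anyIn monthlyLike nc.1) with
    | some nc => some nc.2
    | none =>
      match normalized.find? (fun nc => anyIn monthlyLike nc.1 && anyIn revenueLike nc.1) with
      | some nc => some nc.2
      | none => some c0

def pick_best_churn_value_metric_py (candidates : List String) : Option String :=
  match candidates with
  | [] => none
  | c0 :: _ => threeScans (candidates.map (fun c => (normalizedCol c, c))) c0

-- ===== PORT B =====
-- _rank from Source B
def rkCol (c : String) : Nat :=
  let n := normalizedCol c
  let t := anyIn totalLike n
  let r := anyIn revenueLike n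
  let m := anyIn monthlyLike n
  if t && r then 1 else if r && !m then 2 else if m && r then 3 else 4

-- body of Source B's loop: update on a strictly smaller rank
def pickStep (acc : Nat × Option String) (c : String) : Nat × Option String :=
  let rank := rkCol c
  if rank < acc.1 then (rank, some c) else acc

-- 'return best if best is not None else candidates[0]'
def resolveBest (best : Option String) (c0 : String) : Option String :=
  match best with
  | some c => some c
  | none => some c0

def pick_best_churn_value_metric_py_alt (candidates : List String) : Option String :=
  match candidates with
  | [] => none
  | c0 :: _ => resolveBest (candidates.foldl pickStep (4, none)).2 c0

-- ===== PRECONDITION & SPEC =====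
def Spec_pick_best_churn_value_metric_py (candidates : List String) (out : Option String) : Prop := out = pick_best_churn_value_metric_py_alt candidates
instance (candidates : List String) (out : Option String) : Decidable (Spec_pick_best_churn_value_metric_py candidates out) := by unfold Spec_pick_best_churn_value_metric_py; infer_instance

-- ===== CLAIM (what is proved, stated in full; the proofs are below) =====
def Claim_equal_pick_best_churn_value_metric_py : Prop := ∀ (candidates : List String), Dom_pick_best_churn_value_metric_py candidates → Spec_pick_best_churn_value_metric_py candidates (pick_best_churn_value_metric_py candidates)

-- ===== LEMMAS AND PROOFS =====

-- A's three pass predicates, on the original (un-normalized) candidate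
def Q1 (c : String) : Bool := anyIn totalLike (normalizedCol c) && anyIn revenueLike (normalizedCol c)
def Q2 (c : String) : Bool := anyIn revenueLike (normalizedCol c) && !anyIn monthlyLike (normalizedCol c)
def Q3 (c : String) : Bool := anyIn monthlyLike (normalizedCol c) && anyIn revenueLike (normalizedCol c)

theorem rk_eq_one (c : String) : (rkCol c == 1) = Q1 c := by
  simp only [rkCol, Q1]; split_ifs <;> simp_all

theorem rk_eq_two (c : String) (h1 : Q1 c = false) : (rkCol c == 2) = Q2 c := by
  simp only [rkCol, Q1, Q2] at *; split_ifs <;> simp_all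

theorem rk_eq_three (c : String) (h1 : Q1 c = false) (h2 : Q2 c = false) :
    (rkCol c == 3) = Q3 c := by
  simp only [rkCol, Q1, Q2, Q3] at *; split_ifs <;> simp_all

theorem rk_pos (c : String) : 1 ≤ rkCol c := by
  simp only [rkCol]; split_ifs <;> omega

theorem rk_ge_two (c : String) (h1 : Q1 c = false) : 2 ≤ rkCol c := by
  simp only [rkCol, Q1] at *; split_ifs <;> simp_all

theorem rk_ge_three (c : String) (h1 : Q1 c = false) (h2 : Q2 c = false) : 3 ≤ rkCol c := by
  simp only [rkCol, Q1, Q2] at *; split_ifs <;> simp_all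

theorem rk_eq_four (c : String) (h1 : Q1 c = false) (h2 : Q2 c = false) (h3 : Q3 c = false) :
    rkCol c = 4 := by
  simp only [rkCol, Q1, Q2, Q3] at *; split_ifs <;> simp_all

theorem find?_congr_mem {α : Type} {p q : α → Bool} {l : List α}
    (h : ∀ x ∈ l, p x = q x) : l.find? p = l.find? q := by
  induction l with
  | nil => rfl
  | cons a l ih =>
    have ih' := ih (fun x hx => h x (List.mem_cons_of_mem a hx))
    simp only [List.find?_cons, h a List.mem_cons_self, ih']

theorem fold_no_update (xs : List String) (acc : Nat × Option String)
    (h : ∀ x ∈ xs, ¬ rkCol x < acc.1) : xs.foldl pickStep acc = acc := by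
  induction xs with
  | nil => rfl
  | cons a xs ih =>
    have ha := h a (by simp)
    simp only [List.foldl_cons, pickStep, if_neg ha]
    exact ih (fun x hx => h x (by simp [hx]))

theorem fold_min (xs : List String) (br : Nat) (bo : Option String) (r : Nat)
    (hr : r < br) (hlb : ∀ x ∈ xs, r ≤ rkCol x) (hex : ∃ x ∈ xs, rkCol x = r) :
    xs.foldl pickStep (br, bo) = (r, xs.find? (fun x => rkCol x == r)) := by
  induction xs generalizing br bo with
  | nil => simp at hex
  | cons a xs ih =>
    by_cases ha : rkCol a = r
    · rw [List.foldl_cons, List.find?_cons_of_pos (by simp [ha])]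
      simp only [pickStep, ha, if_pos hr]
      exact fold_no_update xs (r, some a) (fun x hx => by
        have := hlb x (by simp [hx]); omega)
    · have har : r < rkCol a := lt_of_le_of_ne (hlb a (by simp)) (Ne.symm ha)
      have hex' : ∃ x ∈ xs, rkCol x = r := by
        rcases hex with ⟨x, hx, hxr⟩
        rcases List.mem_cons.mp hx with h | h
        · exact absurd (h ▸ hxr) ha
        · exact ⟨x, h, hxr⟩
      have hlb' : ∀ x ∈ xs, r ≤ rkCol x := fun x hx => hlb x (by simp [hx])
      rw [List.foldl_cons, List.find?_cons_of_neg (by simp [ha])]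
      simp only [pickStep]
      by_cases hu : rkCol a < br
      · rw [if_pos hu]; exact ih (rkCol a) (some a) har hlb' hex'
      · rw [if_neg hu]; exact ih br bo hr hlb' hex'

theorem pick_eq (candidates : List String) :
    pick_best_churn_value_metric_py candidates = pick_best_churn_value_metric_py_alt candidates := by
  cases candidates with
  | nil => rfl
  | cons c0 rest =>
    have hmap1 : ((c0 :: rest).map (fun c => (normalizedCol c, c))).find?
        (fun nc => anyIn totalLike nc.1 && anyIn revenueLike nc.1)
        = ((c0 :: rest).find? Q1).map (fun c => (normalizedCol c, c)) := by
      have hq : ((fun nc : String × String => anyIn totalLike nc.1 && anyIn revenueLike nc.1) ∘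
          (fun c => (normalizedCol c, c))) = Q1 := by funext c; simp only [Function.comp_apply, Q1]
      rw [List.find?_map, hq]
    have hmap2 : ((c0 :: rest).map (fun c => (normalizedCol c, c))).find?
        (fun nc => anyIn revenueLike nc.1 && !anyIn monthlyLike nc.1)
        = ((c0 :: rest).find? Q2).map (fun c => (normalizedCol c, c)) := by
      have hq : ((fun nc : String × String => anyIn revenueLike nc.1 && !anyIn monthlyLike nc.1) ∘
          (fun c => (normalizedCol c, c))) = Q2 := by funext c; simp only [Function.comp_apply, Q2]
      rw [List.find?_map, hq]
    have hmap3 : ((c0 :: rest).map (fun c => (normalizedCol c, c))).find?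
        (fun nc => anyIn monthlyLike nc.1 && anyIn revenueLike nc.1)
        = ((c0 :: rest).find? Q3).map (fun c => (normalizedCol c, c)) := by
      have hq : ((fun nc : String × String => anyIn monthlyLike nc.1 && anyIn revenueLike nc.1) ∘
          (fun c => (normalizedCol c, c))) = Q3 := by funext c; simp only [Function.comp_apply, Q3]
      rw [List.find?_map, hq]
    show threeScans ((c0 :: rest).map (fun c => (normalizedCol c, c))) c0
        = resolveBest ((c0 :: rest).foldl pickStep (4, none)).2 c0
    simp only [threeScans, resolveBest, hmap1, hmap2, hmap3]
    cases h1 : (c0 :: rest).find? Q1 with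
    | some c =>
      have hmem := List.mem_of_find?_eq_some h1
      have hfold := fold_min (c0 :: rest) 4 none 1 (by omega)
        (fun x _ => rk_pos x)
        ⟨c, hmem, by have := List.find?_some h1; simpa [← rk_eq_one] using this⟩
      rw [find?_congr_mem (fun x _ => rk_eq_one x)] at hfold
      simp [hfold, h1]
    | none =>
      have hn1 : ∀ x ∈ c0 :: rest, Q1 x = false := fun x hx => by
        simpa using List.find?_eq_none.mp h1 x hx
      cases h2 : (c0 :: rest).find? Q2 with
      | some c =>
        have hmem := List.mem_of_find?_eq_some h2
        have hfold := fold_min (c0 :: rest) 4 none 2 (by omega)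
          (fun x hx => rk_ge_two x (hn1 x hx))
          ⟨c, hmem, by
            have h2q := List.find?_some h2
            have := rk_eq_two c (hn1 c hmem)
            simp_all⟩
        rw [find?_congr_mem (fun x hx => rk_eq_two x (hn1 x hx))] at hfold
        simp [hfold, h2]
      | none =>
        have hn2 : ∀ x ∈ c0 :: rest, Q2 x = false := fun x hx => by
          simpa using List.find?_eq_none.mp h2 x hx
        cases h3 : (c0 :: rest).find? Q3 with
        | some c =>
          have hmem := List.mem_of_find?_eq_some h3
          have hfold := fold_min (c0 :: rest) 4 none 3 (by omega)
            (fun x hx => rk_ge_three x (hn1 x hx) (hn2 x hx))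
            ⟨c, hmem, by
              have h3q := List.find?_some h3
              have := rk_eq_three c (hn1 c hmem) (hn2 c hmem)
              simp_all⟩
          rw [find?_congr_mem (fun x hx => rk_eq_three x (hn1 x hx) (hn2 x hx))] at hfold
          simp [hfold, h3]
        | none =>
          have hn3 : ∀ x ∈ c0 :: rest, Q3 x = false := fun x hx => by
            simpa using List.find?_eq_none.mp h3 x hx
          have hfold := fold_no_update (c0 :: rest) (4, none) (fun x hx => by
            have := rk_eq_four x (hn1 x hx) (hn2 x hx) (hn3 x hx); omega)
          simp [hfold]

-- ===== VERDICT (by name: the statement is the Claim_ definition above) =====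
theorem pick_best_churn_value_metric_py_spec : Claim_equal_pick_best_churn_value_metric_py := by
  intro candidates _
  unfold Spec_pick_best_churn_value_metric_py
  exact pick_eq candidates
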